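-- pv_equiv track=rewrite | github.com/irupawala/Ibrahim-List | Ibrahim Personal/Ready/ADMSU/AA&C/PAs/Week 4/school_bus/school_bus.py | printPowerSet
-- ===== SOURCE A (Python) =====
-- import math
--
-- def printPowerSet(set):
--
--     set_size = len(set)
--     pow_set_size = (int) (math.pow(2, set_size)) # set_size of power set of a set with set_size n is (2**n -1)
--     power_set = []
--
--     for counter in range(pow_set_size):
--         sub_set = []
--         for binary in range(set_size):
--             if ((1 << binary) & counter) > 0:
--                 sub_set.append(set[binary])
--         if 0 in sub_set: # Only adding the subsets with starting point 0 in it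
--             power_set.append(sub_set)
--     return power_set
-- ===== SOURCE B (Python) =====
-- def printPowerSet(set):
--     # Build the power set by incremental doubling instead of bitmask enumeration.
--     result = [[]]
--     for x in set:
--         result = result + [r + [x] for r in result]
--     return [sub for sub in result if 0 in sub]
-- ===== Notes on version B (the rewrite author's own statement) =====
-- stated objective: idiomatic
-- what changed: Replaces the bitmask counter with a nested index loop by incremental power-set doubling (result = result + [r+[x] for r in result]) followed by a filter for subsets containing 0.
import Mathlib
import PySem

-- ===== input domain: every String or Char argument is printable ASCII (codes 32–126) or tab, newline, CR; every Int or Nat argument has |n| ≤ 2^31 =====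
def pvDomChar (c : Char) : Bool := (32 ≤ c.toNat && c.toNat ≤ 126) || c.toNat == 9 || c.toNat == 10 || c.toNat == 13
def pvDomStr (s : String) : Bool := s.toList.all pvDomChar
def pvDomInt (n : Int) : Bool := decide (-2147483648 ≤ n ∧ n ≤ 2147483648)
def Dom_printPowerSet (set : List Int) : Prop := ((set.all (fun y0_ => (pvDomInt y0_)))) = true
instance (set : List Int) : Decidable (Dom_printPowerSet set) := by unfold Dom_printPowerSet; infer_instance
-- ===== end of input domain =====

-- B replaces A's bitmask-counter enumeration with incremental power-set doubling plus a filter (idiomatic, same cost).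

-- ===== PORT A =====
def printPowerSet (set : List Int) : List (List Int) :=
  let set_size : Int := (set.length : Int)
  -- int(math.pow(2, set_size)): a power of two is exactly representable in float, so this is 2 ^ set_size
  let pow_set_size : Int := ((2 ^ set_size.toNat : Nat) : Int)
  (PySem.List.pyRange 0 pow_set_size 1).foldl (fun power_set counter =>
    let sub_set : List Int :=
      (PySem.List.pyRange 0 set_size 1).foldl (fun sub_set binary =>
        if 0 < PySem.Int.band ((1 : Int) <<< binary.toNat) counter then
          sub_set ++ [PySem.List.pyGetD set binary 0]
        else sub_set) []
    if (0 : Int) ∈ sub_set then power_set ++ [sub_set] else power_set) []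

-- ===== PORT B =====
def printPowerSet_alt (set : List Int) : List (List Int) :=
  let result :=
    set.foldl (fun result x => result ++ result.map (fun r => r ++ [x])) [[]]
  result.filter (fun sub => decide ((0 : Int) ∈ sub))

-- ===== PRECONDITION & SPEC =====
def Spec_printPowerSet (set : List Int) (out : List (List Int)) : Prop := out = printPowerSet_alt set
instance (set : List Int) (out : List (List Int)) : Decidable (Spec_printPowerSet set out) := by unfold Spec_printPowerSet; infer_instance

-- ===== CLAIM (what is proved, stated in full; the proofs are below) =====
def Claim_equal_printPowerSet : Prop := ∀ (set : List Int), Dom_printPowerSet set → Spec_printPowerSet set (printPowerSet set)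

-- ===== LEMMAS AND PROOFS =====

-- the subset A assembles for counter c: the elements whose bit is set in c
def maskSub (s : List Int) (c : Nat) : List Int :=
  ((List.range s.length).filter (fun i => c.testBit i)).map (fun i => s.getD i 0)

-- all 2^n subsets in counter order
def enumN (s : List Int) : List (List Int) :=
  (List.range (2 ^ s.length)).map (maskSub s)

lemma pow_and_pos (k c : Nat) : (0 < 2 ^ k &&& c) ↔ c.testBit k = true := by
  constructor
  · intro h
    by_contra hb
    have hz : 2 ^ k &&& c = 0 := by
      apply Nat.zero_of_testBit_eq_false
      intro i
      simp [Nat.testBit_two_pow]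
      intro hik
      subst hik
      simpa using hb
    omega
  · intro h
    have ht : (2 ^ k &&& c).testBit k = true := by simp [h]
    rcases Nat.eq_zero_or_pos (2 ^ k &&& c) with hz | hp
    · rw [hz] at ht; simp at ht
    · exact hp

-- A's inner loop computes maskSub
lemma innerA (s : List Int) (c : Nat) :
    (PySem.List.pyRange 0 (s.length : Int) 1).foldl (fun sub_set binary =>
        if 0 < PySem.Int.band ((1 : Int) <<< binary.toNat) ((c : Nat) : Int) then
          sub_set ++ [PySem.List.pyGetD s binary 0]
        else sub_set) [] = maskSub s c := by
  rw [PySem.List.pyRange_one, List.foldl_map]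
  rw [PySem.List.foldl_congr_mem' _ _
      (fun ss k => if c.testBit k then ss ++ [s.getD k 0] else ss) _
      (by
        intro k hk ss
        simp only [zero_add, Int.toNat_natCast]
        simp only [Int.one_shiftLeft, PySem.Int.band_natCast, PySem.List.pyGetD_natCast]
        simp [pow_and_pos])]
  rw [PySem.List.foldl_append_if (fun k => c.testBit k) (fun k => s.getD k 0)]
  simp [maskSub]

lemma maskSub_append_low (s : List Int) (x : Int) (c : Nat) (hc : c < 2 ^ s.length) :
    maskSub (s ++ [x]) c = maskSub s c := by
  unfold maskSub
  rw [List.length_append, List.length_singleton, List.range_succ]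
  rw [List.filter_append]
  simp [Nat.testBit_lt_two_pow hc]
  intro i hi _
  rw [List.getElem?_append_left hi]

lemma maskSub_append_high (s : List Int) (x : Int) (c : Nat) (hc : c < 2 ^ s.length) :
    maskSub (s ++ [x]) (2 ^ s.length + c) = maskSub s c ++ [x] := by
  unfold maskSub
  rw [List.length_append, List.length_singleton, List.range_succ]
  rw [List.filter_append]
  have hbit : (2 ^ s.length + c).testBit s.length = true := by
    rw [Nat.testBit_two_pow_add_eq, Nat.testBit_lt_two_pow hc]
    rfl
  simp only [List.filter_singleton, hbit]
  rw [List.map_append]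
  congr 1
  · rw [List.filter_congr (fun i hi =>
      Nat.testBit_two_pow_add_gt (List.mem_range.mp hi) c)]
    apply List.map_congr_left
    intro i hi
    have hi' : i < s.length := List.mem_range.mp (List.mem_of_mem_filter hi)
    rw [List.getD_append _ _ _ _ hi']
  · rw [Bool.cond_true, List.map_singleton,
        List.getD_append_right s [x] 0 s.length (le_refl _)]
    simp

lemma enumN_append (s : List Int) (x : Int) :
    enumN (s ++ [x]) = enumN s ++ (enumN s).map (fun r => r ++ [x]) := by
  unfold enumN
  rw [List.length_append, List.length_singleton, pow_succ, Nat.mul_two, List.range_add]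
  rw [List.map_append, List.map_map, List.map_map]
  congr 1
  · apply List.map_congr_left
    intro k hk
    exact maskSub_append_low s x k (List.mem_range.mp hk)
  · apply List.map_congr_left
    intro k hk
    show maskSub (s ++ [x]) (2 ^ s.length + k) = maskSub s k ++ [x]
    exact maskSub_append_high s x k (List.mem_range.mp hk)

lemma foldl_double (s : List Int) :
    s.foldl (fun result x => result ++ result.map (fun r => r ++ [x])) [[]] = enumN s := by
  induction s using List.reverseRecOn with
  | nil => simp [enumN, maskSub]
  | append_singleton s x ih =>
    rw [List.foldl_append, ih, List.foldl_cons, List.foldl_nil, enumN_append]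

-- ===== VERDICT (by name: the statement is the Claim_ definition above) =====
theorem printPowerSet_spec : Claim_equal_printPowerSet := by
  intro s _
  show printPowerSet s = printPowerSet_alt s
  simp only [printPowerSet, printPowerSet_alt]
  rw [foldl_double]
  rw [PySem.List.foldl_congr_mem' _ _
      (fun ps (counter : Int) =>
        if decide ((0 : Int) ∈ maskSub s counter.toNat) = true then
          ps ++ [maskSub s counter.toNat] else ps) _
      (by
        intro counter hmem ps
        have h0 : 0 ≤ counter := ((PySem.List.mem_pyRange_one).mp hmem).1
        have hcast : ((counter.toNat : Nat) : Int) = counter := Int.toNat_of_nonneg h0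
        conv_lhs => rw [← hcast]
        rw [innerA s counter.toNat]
        simp)]
  rw [PySem.List.foldl_append_if
      (fun counter : Int => decide ((0 : Int) ∈ maskSub s counter.toNat))
      (fun counter : Int => maskSub s counter.toNat)]
  rw [PySem.List.pyRange_one, List.filter_map, List.map_map]
  unfold enumN
  rw [List.filter_map]
  simp only [sub_zero, Int.toNat_natCast, Function.comp_def, zero_add]
  simp only [List.nil_append]
  rfl
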